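-- pv_equiv track=rewrite | github.com/FlavioTomeOrbitDS/orbit-text-classification-v2 | scripts_async.py | flatten_tags_list
-- ===== SOURCE A (Python) =====
-- def flatten_tags_list(tags_groups):
--     # Lista para armazenar todas as categorias unificadas
--     all_tags = []
--
--     # Itera sobre cada grupo de categorias na lista fornecida
--     for group in tags_groups:
--         # Divide o grupo em linhas individuais (categorias)
--         tags = group.split('\n')
--         # Remove a numeração de cada categoria e adiciona à lista unificada
--         for tag in tags:
--             # Extrai a parte da categoria após o número e o ponto
--             cleaned_tag = tag.split('. ', 1)[1] if '. ' in tag else tag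
--             all_tags.append(cleaned_tag.strip())
--
--     return all_tags
-- ===== SOURCE B (Python) =====
-- def _clean_tag(tag):
--     # strip the leading "<number>. " by scanning for the first '.'+' ' pair
--     for i in range(len(tag) - 1):
--         if tag[i] == '.' and tag[i + 1] == ' ':
--             return tag[i + 2:].strip()
--     return tag.strip()
--
--
-- def flatten_tags_list(tags_groups):
--     result = []
--     for group in tags_groups:
--         cur = ''
--         for ch in group:
--             if ch == '\n':
--                 result.append(_clean_tag(cur))
--                 cur = ''
--             else:
--                 cur += ch
--         result.append(_clean_tag(cur))
--     return result
-- ===== Notes on version B (the rewrite author's own statement) =====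
-- stated objective: alternative
-- what changed: B replaces A's split('\n')-then-split('. ',1) library pipeline by a single explicit character scanner: it builds each line character by character (flushing on '\n') and removes the numbering by an index scan for the first '.'+' ' pair, never calling split.
import Mathlib
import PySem

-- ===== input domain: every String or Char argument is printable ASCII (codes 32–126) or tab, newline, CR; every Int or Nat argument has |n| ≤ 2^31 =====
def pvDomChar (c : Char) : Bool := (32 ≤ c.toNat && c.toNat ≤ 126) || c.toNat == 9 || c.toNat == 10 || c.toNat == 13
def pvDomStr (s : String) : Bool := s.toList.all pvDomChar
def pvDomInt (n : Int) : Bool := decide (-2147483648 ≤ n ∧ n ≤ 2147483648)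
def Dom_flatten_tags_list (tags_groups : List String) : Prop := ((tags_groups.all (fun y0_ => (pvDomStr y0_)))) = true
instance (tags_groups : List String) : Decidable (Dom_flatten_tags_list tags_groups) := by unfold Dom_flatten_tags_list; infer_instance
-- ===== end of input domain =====

-- B replaces A's split('\n') / split('. ', 1) library pipeline by an explicit character
-- scanner that builds each line itself and strips the numbering by an index scan
-- (alternative decomposition, same cost); equivalence is about the return value only.

-- ===== PORT A =====
-- cleaned_tag = tag.split('. ', 1)[1] if '. ' in tag else tag
-- (the [1] always exists when '. ' is in tag, so the .getD "" default is never taken)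
def pvCleanA (tag : String) : String :=
  if PySem.Str.isIn ". " tag then
    (PySem.List.pyGet? ((PySem.Str.splitMax? tag ". " 1).getD []) 1).getD ""
  else tag

def flatten_tags_list (tags_groups : List String) : List String :=
  tags_groups.foldl (fun all_tags group =>
    let tags := (PySem.Str.split? group "\n").getD []
    tags.foldl (fun all_tags tag =>
      all_tags ++ [PySem.Str.strip (pvCleanA tag)]) all_tags) []

-- ===== PORT B =====
-- B's _clean_tag index loop `for i in range(len(tag)-1): if tag[i]=='.' and tag[i+1]==' '`
-- ported as the equivalent structural scan over the character list (exact: same first-match scan).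
def pvAfterDot : List Char → Option (List Char)
  | [] => none
  | [_] => none
  | c1 :: c2 :: r => if c1 = '.' ∧ c2 = ' ' then some r else pvAfterDot (c2 :: r)
termination_by l => l.length
decreasing_by simp

def pvCleanTag (t : List Char) : String :=
  match pvAfterDot t with
  | some r => String.ofList (PySem.Chars.strip r)   -- return tag[i+2:].strip()
  | none => String.ofList (PySem.Chars.strip t)     -- return tag.strip()

def flatten_tags_list_alt (tags_groups : List String) : List String :=
  tags_groups.foldl (fun result group =>
    let st := group.toList.foldl
      (fun (st : List String × List Char) ch =>
        if ch = '\n' then (st.1 ++ [pvCleanTag st.2], []) else (st.1, st.2 ++ [ch]))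
      (result, ([] : List Char))
    st.1 ++ [pvCleanTag st.2]) []

-- ===== PRECONDITION & SPEC =====
def Spec_flatten_tags_list (tags_groups : List String) (out : List String) : Prop := out = flatten_tags_list_alt tags_groups
instance (tags_groups : List String) (out : List String) : Decidable (Spec_flatten_tags_list tags_groups out) := by unfold Spec_flatten_tags_list; infer_instance

-- ===== CLAIM (what is proved, stated in full; the proofs are below) =====
def Claim_equal_flatten_tags_list : Prop := ∀ (tags_groups : List String), Dom_flatten_tags_list tags_groups → Spec_flatten_tags_list tags_groups (flatten_tags_list tags_groups)

-- ===== LEMMAS AND PROOFS =====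

-- Simple structural single-character splitter used to characterise PySem.Chars.splitOn.
def pvSplit1 (x : Char) : List Char → List (List Char)
  | [] => [[]]
  | c :: cs => if c = x then [] :: pvSplit1 x cs else (pvSplit1 x cs).modifyHead (c :: ·)

lemma pvSplit1_ne_nil (x : Char) (l : List Char) : pvSplit1 x l ≠ [] := by
  cases l with
  | nil => simp [pvSplit1]
  | cons c cs =>
    simp only [pvSplit1]
    split_ifs
    · simp
    · cases h : pvSplit1 x cs with
      | nil => exact absurd h (pvSplit1_ne_nil x cs)
      | cons a t => simp

def pvConsFirst (p : List Char) : List (List Char) → List (List Char)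
  | [] => [p]
  | h :: t => (p ++ h) :: t

lemma pvGo_eq (x : Char) (l : List Char) : ∀ (fuel : Nat) (cur : List Char) (acc : List (List Char)),
    l.length ≤ fuel →
    PySem.Chars.splitOn.go [x] fuel l cur acc
      = acc.reverse ++ pvConsFirst cur.reverse (pvSplit1 x l) := by
  induction l with
  | nil =>
    intro fuel cur acc _
    cases fuel <;> simp [PySem.Chars.splitOn.go, pvSplit1, pvConsFirst]
  | cons c rest ih =>
    intro fuel cur acc hf
    cases fuel with
    | zero => simp at hf
    | succ f =>
      have hf' : rest.length ≤ f := by simpa using hf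
      by_cases hc : c = x
      · subst hc
        have hpre : List.isPrefixOf [c] (c :: rest) = true := by
          simp [List.isPrefixOf]
        simp only [PySem.Chars.splitOn.go, hpre, if_pos, List.length_cons,
          List.length_nil, List.drop_succ_cons, List.drop_zero]
        rw [ih f [] (cur.reverse :: acc) (by simpa using hf')]
        cases h : pvSplit1 c rest with
        | nil => exact absurd h (pvSplit1_ne_nil c rest)
        | cons a t => simp [pvSplit1, pvConsFirst, h]
      · have hpre : List.isPrefixOf [x] (c :: rest) = false := by
          simp only [List.isPrefixOf, Bool.and_eq_false_iff, beq_eq_false_iff_ne, ne_eq]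
          exact Or.inl (fun h => hc h.symm)
        simp only [PySem.Chars.splitOn.go, hpre, Bool.false_eq_true, if_false]
        rw [ih f (c :: cur) acc (by simpa using hf')]
        simp only [pvSplit1, if_neg hc, List.reverse_cons]
        cases h : pvSplit1 x rest with
        | nil => exact absurd h (pvSplit1_ne_nil x rest)
        | cons a t => simp [pvConsFirst]

lemma pvSplitOn_single (x : Char) (s : List Char) :
    PySem.Chars.splitOn s [x] = pvSplit1 x s := by
  have := pvGo_eq x s (s.length + 1) [] [] (by omega)
  simp only [PySem.Chars.splitOn, this]
  cases h : pvSplit1 x s with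
  | nil => exact absurd h (pvSplit1_ne_nil x s)
  | cons a t => simp [pvConsFirst]

-- ---- characterisation of A's per-tag cleaning against B's scanner ----

-- the part of t before the first ". " (meaningful only when pvAfterDot t = some _)
def pvPreDot : List Char → List Char
  | [] => []
  | [c] => [c]
  | c1 :: c2 :: r => if c1 = '.' ∧ c2 = ' ' then [] else c1 :: pvPreDot (c2 :: r)
termination_by l => l.length
decreasing_by simp

lemma pvFind_go (t : List Char) : ∀ (k : Nat),
    (PySem.Chars.find.go ['.', ' '] t k = -1) ↔ pvAfterDot t = none := by
  induction t using pvAfterDot.induct with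
  | case1 =>
    intro k
    simp [PySem.Chars.find.go, pvAfterDot, List.isEmpty]
  | case2 c =>
    intro k
    simp [PySem.Chars.find.go, List.isPrefixOf, pvAfterDot, List.isEmpty]
  | case3 c1 c2 r hcond =>
    obtain ⟨h1, h2⟩ := hcond
    subst h1; subst h2
    intro k
    have hpre : List.isPrefixOf ['.', ' '] ('.' :: ' ' :: r) = true := by
      simp [List.isPrefixOf]
    simp [PySem.Chars.find.go, hpre, pvAfterDot]
  | case4 c1 c2 r hcond ih =>
    intro k
    have hpre : List.isPrefixOf ['.', ' '] (c1 :: c2 :: r) = false := by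
      simp only [List.isPrefixOf, Bool.and_eq_false_iff, beq_eq_false_iff_ne, ne_eq]
      by_cases h1 : c1 = '.'
      · subst h1
        right; left
        intro h2
        exact hcond ⟨rfl, h2.symm⟩
      · left; exact fun h => h1 h.symm
    have ih' := ih (k + 1)
    simp only [PySem.Chars.find.go] at ih'
    simp only [PySem.Chars.find.go, hpre, Bool.false_eq_true, if_false]
    rw [ih']
    simp [pvAfterDot, hcond]

lemma pvGoZero (fuel : Nat) (r cur : List Char) (acc : List (List Char)) :
    PySem.Chars.splitOnMax.go ['.', ' '] fuel 0 r cur acc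
      = acc.reverse ++ [cur.reverse ++ r] := by
  cases fuel with
  | zero => simp [PySem.Chars.splitOnMax.go]
  | succ f => cases r <;> simp [PySem.Chars.splitOnMax.go]

lemma pvGoOneNil (fuel : Nat) (cur : List Char) (acc : List (List Char)) :
    PySem.Chars.splitOnMax.go ['.', ' '] fuel 1 [] cur acc
      = acc.reverse ++ [cur.reverse] := by
  cases fuel <;> simp [PySem.Chars.splitOnMax.go]

lemma pvGoOne (t : List Char) : ∀ (fuel : Nat) (cur : List Char) (acc : List (List Char)),
    t.length < fuel →
    PySem.Chars.splitOnMax.go ['.', ' '] fuel 1 t cur acc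
      = acc.reverse ++ (match pvAfterDot t with
          | some r => [cur.reverse ++ pvPreDot t, r]
          | none => [cur.reverse ++ t]) := by
  induction t using pvAfterDot.induct with
  | case1 =>
    intro fuel cur acc _
    rw [pvGoOneNil]
    simp [pvAfterDot]
  | case2 c =>
    intro fuel cur acc hf
    cases fuel with
    | zero => simp at hf
    | succ f =>
      have hpre : List.isPrefixOf ['.', ' '] [c] = false := by
        simp [List.isPrefixOf]
      simp [PySem.Chars.splitOnMax.go, hpre, pvGoOneNil, pvAfterDot]
  | case3 c1 c2 r hcond =>
    obtain ⟨h1, h2⟩ := hcond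
    subst h1; subst h2
    intro fuel cur acc hf
    cases fuel with
    | zero => simp at hf
    | succ f =>
      have hpre : List.isPrefixOf ['.', ' '] ('.' :: ' ' :: r) = true := by
        simp [List.isPrefixOf]
      simp [PySem.Chars.splitOnMax.go, hpre, pvGoZero, pvAfterDot, pvPreDot]
  | case4 c1 c2 r hcond ih =>
    intro fuel cur acc hf
    cases fuel with
    | zero => simp at hf
    | succ f =>
      have hpre : List.isPrefixOf ['.', ' '] (c1 :: c2 :: r) = false := by
        simp only [List.isPrefixOf, Bool.and_eq_false_iff, beq_eq_false_iff_ne, ne_eq]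
        by_cases h1 : c1 = '.'
        · subst h1
          right; left
          intro h2
          exact hcond ⟨rfl, h2.symm⟩
        · left; exact fun h => h1 h.symm
      simp only [PySem.Chars.splitOnMax.go, hpre, Bool.false_eq_true, if_false,
        one_ne_zero]
      rw [ih f (c1 :: cur) acc (by simp at hf ⊢; omega)]
      simp only [pvAfterDot, pvPreDot, if_neg hcond, List.reverse_cons]
      cases h : pvAfterDot (c2 :: r) <;> simp

-- A's per-tag expression equals B's scanner on every string
lemma pvCleanEq (s : String) : PySem.Str.strip (pvCleanA s) = pvCleanTag s.toList := by
  apply String.toList_inj.mp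
  have hsep : (". " : String).toList = ['.', ' '] := rfl
  unfold pvCleanA pvCleanTag
  cases h : pvAfterDot s.toList with
  | none =>
    have hfind : PySem.Chars.find s.toList ['.', ' '] = -1 := by
      unfold PySem.Chars.find
      exact (pvFind_go s.toList 0).mpr h
    have hin : PySem.Chars.isIn ['.', ' '] s.toList = false := by
      simp [PySem.Chars.isIn, hfind]
    simp [hsep, hin, PySem.Str.toList_strip, String.toList_ofList]
  | some r =>
    have hfind : PySem.Chars.find s.toList ['.', ' '] ≠ -1 := by
      unfold PySem.Chars.find
      intro hc
      have h2 := (pvFind_go s.toList 0).mp hc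
      rw [h2] at h
      simp at h
    have hin : PySem.Chars.isIn ['.', ' '] s.toList = true := by
      simp [PySem.Chars.isIn, hfind]
    have hchars : PySem.Chars.splitMax? s.toList ['.', ' '] 1
        = some [pvPreDot s.toList, r] := by
      unfold PySem.Chars.splitMax? PySem.Chars.splitOnMax
      rw [if_neg (by simp), if_neg (by omega)]
      have := pvGoOne s.toList (s.toList.length + 1) [] [] (by omega)
      rw [show (1 : Int).toNat = 1 from rfl, this, h]
      simp
    have hmap := PySem.Str.splitMax?_map s ". " 1
    rw [hsep, hchars] at hmap
    cases hsm : PySem.Str.splitMax? s ". " 1 with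
    | none => rw [hsm] at hmap; exact absurd hmap (by simp)
    | some l =>
      rw [hsm] at hmap
      simp only [Option.map_some, Option.some_inj] at hmap
      cases l with
      | nil => simp at hmap
      | cons a l' =>
        cases l' with
        | nil => simp at hmap
        | cons b l'' =>
          cases l'' with
          | cons c l''' => simp at hmap
          | nil =>
            have hb : b.toList = r := by
              simpa using congrArg (fun u => u.getLast?) hmap
            simp [hsep, hin, PySem.Str.toList_strip, String.toList_ofList, hb]

-- A's pieces per group, as lists of characters
lemma pvGroupPieces (g : String) :
    ((PySem.Str.split? g "\n").getD []).map String.toList = pvSplit1 '\n' g.toList := by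
  have hsep : ("\n" : String).toList = ['\n'] := rfl
  have hchars : PySem.Chars.split? g.toList ['\n'] = some (pvSplit1 '\n' g.toList) := by
    unfold PySem.Chars.split?
    rw [if_neg (by simp), pvSplitOn_single]
  have hmap := PySem.Str.split?_map g "\n"
  rw [hsep, hchars] at hmap
  cases hsm : PySem.Str.split? g "\n" with
  | none => rw [hsm] at hmap; exact absurd hmap (by simp)
  | some l =>
    rw [hsm] at hmap
    simpa using hmap

-- inner loop of A appends the cleaned tags
lemma pvInner (tags : List String) (acc : List String) :
    tags.foldl (fun all_tags tag => all_tags ++ [PySem.Str.strip (pvCleanA tag)]) acc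
      = acc ++ tags.map (fun tag => PySem.Str.strip (pvCleanA tag)) := by
  induction tags generalizing acc with
  | nil => simp
  | cons t ts ih => simp [List.foldl_cons, ih]

-- outer loop of A is a flatMap of per-group cleaned pieces
lemma pvOuterA (groups : List String) (acc : List String) :
    groups.foldl (fun all_tags group =>
      ((PySem.Str.split? group "\n").getD []).foldl
        (fun all_tags tag => all_tags ++ [PySem.Str.strip (pvCleanA tag)]) all_tags) acc
      = acc ++ groups.flatMap (fun group =>
          (pvSplit1 '\n' group.toList).map pvCleanTag) := by
  induction groups generalizing acc with
  | nil => simp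
  | cons g gs ih =>
    have hmapg : ((PySem.Str.split? g "\n").getD []).map
        (fun tag => PySem.Str.strip (pvCleanA tag))
        = (pvSplit1 '\n' g.toList).map pvCleanTag := by
      rw [← pvGroupPieces g, List.map_map]
      exact List.map_congr_left (fun t _ => pvCleanEq t)
    rw [List.foldl_cons, pvInner, ih, hmapg, List.flatMap_cons, List.append_assoc]

-- B's per-group character scan produces the cleaned pieces
lemma pvScanB (l : List Char) : ∀ (res : List String) (cur : List Char),
    (l.foldl (fun (st : List String × List Char) ch =>
        if ch = '\n' then (st.1 ++ [pvCleanTag st.2], []) else (st.1, st.2 ++ [ch]))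
      (res, cur)).1
    ++ [pvCleanTag (l.foldl (fun (st : List String × List Char) ch =>
        if ch = '\n' then (st.1 ++ [pvCleanTag st.2], []) else (st.1, st.2 ++ [ch]))
      (res, cur)).2]
      = res ++ (pvConsFirst cur (pvSplit1 '\n' l)).map pvCleanTag := by
  induction l with
  | nil =>
    intro res cur
    simp [pvSplit1, pvConsFirst]
  | cons c cs ih =>
    intro res cur
    by_cases hc : c = '\n'
    · subst hc
      rw [List.foldl_cons, if_pos (show ('\n' : Char) = '\n' from rfl)]
      rw [ih (res ++ [pvCleanTag cur]) []]
      simp only [pvSplit1, if_pos]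
      cases h : pvSplit1 '\n' cs with
      | nil => exact absurd h (pvSplit1_ne_nil '\n' cs)
      | cons h0 t0 => simp [pvConsFirst]
    · rw [List.foldl_cons, if_neg hc]
      rw [ih res (cur ++ [c])]
      simp only [pvSplit1, if_neg hc]
      cases h : pvSplit1 '\n' cs with
      | nil => exact absurd h (pvSplit1_ne_nil '\n' cs)
      | cons h0 t0 => simp [pvConsFirst]

-- B's outer loop is the same flatMap
lemma pvOuterB (groups : List String) (res : List String) :
    groups.foldl (fun result group =>
      let st := group.toList.foldl
        (fun (st : List String × List Char) ch =>
          if ch = '\n' then (st.1 ++ [pvCleanTag st.2], []) else (st.1, st.2 ++ [ch]))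
        (result, ([] : List Char))
      st.1 ++ [pvCleanTag st.2]) res
      = res ++ groups.flatMap (fun group =>
          (pvSplit1 '\n' group.toList).map pvCleanTag) := by
  induction groups generalizing res with
  | nil => simp
  | cons g gs ih =>
    have hcf : pvConsFirst [] (pvSplit1 '\n' g.toList) = pvSplit1 '\n' g.toList := by
      cases h : pvSplit1 '\n' g.toList with
      | nil => exact absurd h (pvSplit1_ne_nil '\n' g.toList)
      | cons h0 t0 => simp [pvConsFirst]
    have hstep : (let st := g.toList.foldl (fun (st : List String × List Char) ch => if ch = '\n' then (st.1 ++ [pvCleanTag st.2], []) else (st.1, st.2 ++ [ch])) (res, ([] : List Char)); st.1 ++ [pvCleanTag st.2])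
        = (g.toList.foldl
            (fun (st : List String × List Char) ch =>
              if ch = '\n' then (st.1 ++ [pvCleanTag st.2], []) else (st.1, st.2 ++ [ch]))
            (res, ([] : List Char))).1
          ++ [pvCleanTag (g.toList.foldl
            (fun (st : List String × List Char) ch =>
              if ch = '\n' then (st.1 ++ [pvCleanTag st.2], []) else (st.1, st.2 ++ [ch]))
            (res, ([] : List Char))).2] := rfl
    rw [List.foldl_cons, hstep, pvScanB g.toList res [], hcf, ih,
      List.flatMap_cons, List.append_assoc]

-- ===== VERDICT (by name: the statement is the Claim_ definition above) =====
theorem flatten_tags_list_spec : Claim_equal_flatten_tags_list := by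
  intro tg _
  unfold Spec_flatten_tags_list flatten_tags_list flatten_tags_list_alt
  rw [pvOuterA tg [], pvOuterB tg []]
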